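-- pv_equiv track=rewrite | github.com/greenlandphil/inventory-wishlist | app.py | filter_by_tags
-- ===== SOURCE A (Python) =====
-- from typing import Dict, List, Any, Optional, Tuple
--
-- def filter_by_tags(products: List[Dict[str, Any]], selected: List[str]) -> List[Dict[str, Any]]:
--     if not selected:
--         return products
--     sel = set(selected)
--     out = []
--     for p in products:
--         p_tags = set([t.strip() for t in (p.get("tags") or [])])
--         if sel.issubset(p_tags):
--             out.append(p)
--     return out
-- ===== SOURCE B (Python) =====
-- from typing import Dict, List, Any
--
-- def filter_by_tags(products: List[Dict[str, Any]], selected: List[str]) -> List[Dict[str, Any]]: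
--     # Progressive refinement: precompute each product's stripped tag set once,
--     # then narrow the candidate list one selected tag at a time.
--     if not selected:
--         return products
--     candidates = [({t.strip() for t in (p.get("tags") or [])}, p) for p in products]
--     for s in selected:
--         candidates = [(tags, p) for (tags, p) in candidates if s in tags]
--     return [p for (_, p) in candidates]
-- ===== Notes on version B (the rewrite author's own statement) =====
-- stated objective: alternative
-- what changed: Instead of a per-product subset test over all selected tags, B precomputes each product's stripped tag set once and then loops over the selected tags in the outer loop, progressively narrowing the candidate list (loop interchange / iterative refinement), so products dropped by an early tag are never examined against later tags.
import Mathlib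
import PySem

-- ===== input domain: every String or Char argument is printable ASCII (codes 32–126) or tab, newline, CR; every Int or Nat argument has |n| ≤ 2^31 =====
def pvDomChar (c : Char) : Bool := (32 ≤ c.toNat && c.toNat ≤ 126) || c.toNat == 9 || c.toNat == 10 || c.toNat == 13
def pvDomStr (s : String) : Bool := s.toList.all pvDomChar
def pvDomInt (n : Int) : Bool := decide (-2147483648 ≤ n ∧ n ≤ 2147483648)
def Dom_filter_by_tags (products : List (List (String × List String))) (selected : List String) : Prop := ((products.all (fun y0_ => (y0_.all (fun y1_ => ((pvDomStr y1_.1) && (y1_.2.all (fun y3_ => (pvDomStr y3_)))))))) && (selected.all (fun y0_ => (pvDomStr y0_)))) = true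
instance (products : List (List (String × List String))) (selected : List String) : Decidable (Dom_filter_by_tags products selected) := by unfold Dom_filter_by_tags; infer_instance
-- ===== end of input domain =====

-- ===== PORT A =====
-- A port of A: p.get("tags") on the assoc-list parameter goes through PySem.Dict.ofList
-- (dict construction from the pairs) and Dict.getD; '(… or [])' is exact as getD with
-- default [] since the only falsy list value is [] itself.
def filter_by_tags (products : List (List (String × List String))) (selected : List String) : List (List (String × List String)) :=
  if selected = [] then products
  else
    let sel : PySem.Set String := PySem.Set.ofList selected
    products.foldl (fun out p =>
      let p_tags : PySem.Set String :=
        PySem.Set.ofList ((PySem.Dict.getD (PySem.Dict.ofList p) "tags" []).map (fun t => PySem.Str.strip t))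
      if PySem.Set.issubset sel p_tags then out ++ [p] else out) []

-- ===== PORT B =====
def filter_by_tags_alt (products : List (List (String × List String))) (selected : List String) : List (List (String × List String)) :=
  if selected = [] then products
  else
    let candidates : List (PySem.Set String × List (String × List String)) :=
      products.map (fun p =>
        (PySem.Set.ofList ((PySem.Dict.getD (PySem.Dict.ofList p) "tags" []).map (fun t => PySem.Str.strip t)), p))
    let final := selected.foldl
      (fun cand s => cand.filter (fun tp => PySem.Set.contains tp.1 s)) candidates
    final.map (fun tp => tp.2)

-- ===== PRECONDITION & SPEC =====
def Spec_filter_by_tags (products : List (List (String × List String))) (selected : List String) (out : List (List (String × List String))) : Prop := out = filter_by_tags_alt products selected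
instance (products : List (List (String × List String))) (selected : List String) (out : List (List (String × List String))) : Decidable (Spec_filter_by_tags products selected out) := by unfold Spec_filter_by_tags; infer_instance

-- ===== CLAIM (what is proved, stated in full; the proofs are below) =====
def Claim_equal_filter_by_tags : Prop := ∀ (products : List (List (String × List String))) (selected : List String), Dom_filter_by_tags products selected → Spec_filter_by_tags products selected (filter_by_tags products selected)

-- ===== LEMMAS AND PROOFS =====

-- B's outer loop over the selected tags refines the candidate list; its result is
-- one filter by the conjunction of all the membership tests.
theorem foldl_filter_eq_filter_all {α : Type} (ss : List String)
    (cand : List (PySem.Set String × α)) :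
    ss.foldl (fun c s => c.filter (fun tp => PySem.Set.contains tp.1 s)) cand
      = cand.filter (fun tp => ss.all (fun s => PySem.Set.contains tp.1 s)) := by
  induction ss generalizing cand with
  | nil => simp
  | cons s ss ih =>
      simp only [List.foldl_cons, ih, List.filter_filter, List.all_cons]
      exact List.filter_congr (fun x _ => Bool.and_comm _ _)

-- A's subset test equals B's conjunction of per-tag membership tests.
theorem issubset_eq_all (selected : List String) (T : PySem.Set String) :
    PySem.Set.issubset (PySem.Set.ofList selected) T
      = selected.all (fun s => PySem.Set.contains T s) := by
  rw [Bool.eq_iff_iff]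
  simp [PySem.Set.issubset_iff, PySem.Set.mem_ofList, List.all_eq_true]

-- ===== VERDICT (by name: the statement is the Claim_ definition above) =====
theorem filter_by_tags_spec : Claim_equal_filter_by_tags := by
  intro products selected _
  unfold Spec_filter_by_tags filter_by_tags filter_by_tags_alt
  by_cases h : selected = []
  · simp [h]
  · simp only [if_neg h]
    rw [PySem.List.foldl_append_if_eq_filter, foldl_filter_eq_filter_all,
        List.filter_map, List.map_map]
    simp only [Function.comp_def, issubset_eq_all]
    rw [List.map_id']
    exact (List.nil_append _).symm
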